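-- pv_equiv track=rewrite | github.com/MicroStrategy/mstrio-py | mstrio/utils/helper.py | dict_compare
-- ===== SOURCE A (Python) =====
-- def dict_compare(d1, d2):
--     d1_keys = set(d1.keys())
--     d2_keys = set(d2.keys())
--     intersect_keys = d1_keys.intersection(d2_keys)
--     added = d1_keys - d2_keys
--     removed = d2_keys - d1_keys
--     modified = {o: (d1[o], d2[o]) for o in intersect_keys if d1[o] != d2[o]}
--     same = {o for o in intersect_keys if d1[o] == d2[o]}
--     return added, removed, modified, same
-- ===== SOURCE B (Python) =====
-- def dict_compare(d1, d2):
--     added, removed, modified, same = set(), set(), {}, set()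
--     for k, v in d1.items():
--         if k not in d2:
--             added.add(k)
--         elif v == d2[k]:
--             same.add(k)
--         else:
--             modified[k] = (v, d2[k])
--     for k in d2:
--         if k not in d1:
--             removed.add(k)
--     return added, removed, modified, same
-- ===== Notes on version B (the rewrite author's own statement) =====
-- stated objective: alternative
-- what changed: Replaces the set-algebra decomposition (key sets, intersection, two differences, two comprehensions re-looking values up) with a single classifying pass over d1 that routes each key to added/modified/same as it is visited, plus one pass over d2 for removed.
import Mathlib
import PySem

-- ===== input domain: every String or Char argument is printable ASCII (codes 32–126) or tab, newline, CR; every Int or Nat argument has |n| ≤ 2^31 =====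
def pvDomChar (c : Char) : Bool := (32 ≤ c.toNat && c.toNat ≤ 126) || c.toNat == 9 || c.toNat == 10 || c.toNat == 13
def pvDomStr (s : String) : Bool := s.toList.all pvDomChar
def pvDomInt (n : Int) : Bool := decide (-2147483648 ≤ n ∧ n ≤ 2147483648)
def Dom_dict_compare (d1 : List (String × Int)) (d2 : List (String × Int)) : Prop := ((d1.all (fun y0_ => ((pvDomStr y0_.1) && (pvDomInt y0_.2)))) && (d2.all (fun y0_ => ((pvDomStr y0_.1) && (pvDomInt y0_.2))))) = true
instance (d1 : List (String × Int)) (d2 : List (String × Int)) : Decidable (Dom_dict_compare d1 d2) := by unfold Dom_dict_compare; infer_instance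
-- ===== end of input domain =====

-- ===== PORT A =====
-- d[k] at call sites where the key is known present (comprehensions range over the key intersection).
def pvLookup (d : List (String × Int)) (k : String) : Option Int :=
  (d.find? (fun p => p.1 == k)).map Prod.snd

def pvGet (d : List (String × Int)) (k : String) : Int := (pvLookup d k).getD 0

def dict_compare (d1 : List (String × Int)) (d2 : List (String × Int)) : List String × List String × (List (String × Int × Int)) × List String :=
  let d1_keys : PySem.Set String := PySem.Set.ofList (d1.map Prod.fst)
  let d2_keys : PySem.Set String := PySem.Set.ofList (d2.map Prod.fst)
  let intersect_keys := PySem.Set.inter d1_keys d2_keys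
  let added := PySem.Set.diff d1_keys d2_keys
  let removed := PySem.Set.diff d2_keys d1_keys
  let modified := (intersect_keys.filter (fun o => pvGet d1 o != pvGet d2 o)).map
    (fun o => (o, pvGet d1 o, pvGet d2 o))
  let same : PySem.Set String := PySem.Set.ofList (intersect_keys.filter (fun o => pvGet d1 o == pvGet d2 o))
  (added, removed, modified, same)

-- ===== PORT B =====
def pvStep (d2 : List (String × Int))
    (st : PySem.Set String × PySem.Dict String (Int × Int) × PySem.Set String)
    (kv : String × Int) : PySem.Set String × PySem.Dict String (Int × Int) × PySem.Set String :=
  if (pvLookup d2 kv.1).isNone then (PySem.Set.add st.1 kv.1, st.2.1, st.2.2)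
  else if kv.2 == pvGet d2 kv.1 then (st.1, st.2.1, PySem.Set.add st.2.2 kv.1)
  else (st.1, st.2.1.insert kv.1 (kv.2, pvGet d2 kv.1), st.2.2)

def dict_compare_alt (d1 : List (String × Int)) (d2 : List (String × Int)) : List String × List String × (List (String × Int × Int)) × List String :=
  let acc := d1.foldl (pvStep d2) (PySem.Set.empty, (⟨[]⟩ : PySem.Dict String (Int × Int)), PySem.Set.empty)
  let removed := d2.foldl (fun r kv => if (pvLookup d1 kv.1).isNone then PySem.Set.add r kv.1 else r) PySem.Set.empty
  (acc.1, removed, acc.2.1.items, acc.2.2)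

-- ===== PRECONDITION & SPEC =====
-- Pre_ excludes association lists with duplicate keys: the parameters are Python dicts, in which
-- duplicate keys cannot occur, so such lists represent no dict input A is ever called on.
def Pre_dict_compare (d1 : List (String × Int)) (d2 : List (String × Int)) : Prop :=
  (d1.map Prod.fst).Nodup ∧ (d2.map Prod.fst).Nodup
instance (d1 : List (String × Int)) (d2 : List (String × Int)) : Decidable (Pre_dict_compare d1 d2) := by unfold Pre_dict_compare; infer_instance
def pvWitness_dict_compare : (List (String × Int)) × (List (String × Int)) :=
  ([("a", 1), ("b", 2)], [("b", 3), ("c", 4)])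

def Spec_dict_compare (d1 : List (String × Int)) (d2 : List (String × Int)) (out : List String × List String × (List (String × Int × Int)) × List String) : Prop := out = dict_compare_alt d1 d2
instance (d1 : List (String × Int)) (d2 : List (String × Int)) (out : List String × List String × (List (String × Int × Int)) × List String) : Decidable (Spec_dict_compare d1 d2 out) := by unfold Spec_dict_compare; infer_instance

-- ===== CLAIM (what is proved, stated in full; the proofs are below) =====
def Claim_equal_dict_compare : Prop := ∀ (d1 : List (String × Int)) (d2 : List (String × Int)), Dom_dict_compare d1 d2 → Pre_dict_compare d1 d2 → Spec_dict_compare d1 d2 (dict_compare d1 d2)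

-- ===== LEMMAS AND PROOFS =====
-- canonical forms of the four result components, to which both ports are reduced
def addedC (d1 d2 : List (String × Int)) : List String :=
  (d1.filter (fun kv => (pvLookup d2 kv.1).isNone)).map Prod.fst
def modC (d1 d2 : List (String × Int)) : List (String × Int × Int) :=
  (d1.filter (fun kv => (pvLookup d2 kv.1).isSome && kv.2 != pvGet d2 kv.1)).map
    (fun kv => (kv.1, kv.2, pvGet d2 kv.1))
def sameC (d1 d2 : List (String × Int)) : List String :=
  (d1.filter (fun kv => (pvLookup d2 kv.1).isSome && kv.2 == pvGet d2 kv.1)).map Prod.fst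

lemma lookup_isNone (d : List (String × Int)) (k : String) :
    (pvLookup d k).isNone = !(d.map Prod.fst).contains k := by
  induction d with
  | nil => rfl
  | cons p t ih =>
    by_cases h : p.1 = k
    · simp [pvLookup, h]
    · have hb : (p.1 == k) = false := beq_eq_false_iff_ne.mpr h
      have hb2 : (k == p.1) = false := beq_eq_false_iff_ne.mpr (Ne.symm h)
      simp only [pvLookup, List.map_cons, List.find?_cons, hb, List.contains_cons, hb2,
        Bool.false_or] at *
      exact ih
lemma find?_of_nodup_mem (l : List (String × Int)) (kv : String × Int)
    (h : (l.map Prod.fst).Nodup) (hm : kv ∈ l) :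
    l.find? (fun p => p.1 == kv.1) = some kv := by
  induction l with
  | nil => simp at hm
  | cons p t ih =>
    simp only [List.map_cons, List.nodup_cons] at h
    rcases List.mem_cons.mp hm with hm | hm
    · simp [hm]
    · have hne : p.1 ≠ kv.1 := by
        intro he; exact h.1 (he ▸ (List.mem_map_of_mem hm))
      simp [beq_eq_false_iff_ne.mpr hne, ih h.2 hm]

lemma pvGet_of_nodup_mem (l : List (String × Int)) (kv : String × Int)
    (h : (l.map Prod.fst).Nodup) (hm : kv ∈ l) : pvGet l kv.1 = kv.2 := by
  simp [pvGet, pvLookup, find?_of_nodup_mem l kv h hm]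

lemma lookup_isSome (d : List (String × Int)) (k : String) :
    (pvLookup d k).isSome = (d.map Prod.fst).contains k := by
  have := lookup_isNone d k
  cases ho : pvLookup d k <;> simp [ho] at this ⊢ <;> simp [this]


lemma contains_eq_decide (l : List String) (a : String) : l.contains a = decide (a ∈ l) := by
  by_cases h : a ∈ l <;> simp [h]

lemma lookup_isSome_mem (d : List (String × Int)) (k : String) :
    (pvLookup d k).isSome = decide (k ∈ d.map Prod.fst) := by
  rw [lookup_isSome]; by_cases h : k ∈ d.map Prod.fst <;> simp [h]

lemma filter_not_contains (d1 d2 : List (String × Int)) :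
    List.filter (fun k => !(d2.map Prod.fst).contains k) (d1.map Prod.fst) = addedC d1 d2 := by
  rw [List.filter_map, addedC]
  congr 1
  apply List.filter_congr
  intro kv _
  simp [Function.comp, lookup_isSome_mem, ← Option.not_isSome]

lemma dict_compare_eq_canon (d1 d2 : List (String × Int))
    (h1 : (d1.map Prod.fst).Nodup) (h2 : (d2.map Prod.fst).Nodup) :
    dict_compare d1 d2 = (addedC d1 d2, addedC d2 d1, modC d1 d2, sameC d1 d2) := by
  simp only [dict_compare, PySem.Set.diff, PySem.Set.inter, PySem.Set.contains,
    PySem.Set.ofList_eq_self_of_nodup _ h1, PySem.Set.ofList_eq_self_of_nodup _ h2]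
  simp only [Prod.mk.injEq]
  refine ⟨filter_not_contains d1 d2, filter_not_contains d2 d1, ?_, ?_⟩
  · rw [List.filter_filter, List.filter_map, List.map_map]
    rw [List.filter_congr (q := fun kv => (pvLookup d2 kv.1).isSome && kv.2 != pvGet d2 kv.1)
      (fun kv hkv => by
        simp only [Function.comp, lookup_isSome_mem, pvGet_of_nodup_mem d1 kv h1 hkv,
          contains_eq_decide, Bool.and_comm])]
    exact List.map_congr_left (fun kv hkv => by
      simp [Function.comp, pvGet_of_nodup_mem d1 kv h1 (List.mem_of_mem_filter hkv)])
  · rw [List.filter_filter]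
    rw [PySem.Set.ofList_eq_self_of_nodup _ (h1.filter _), List.filter_map, sameC]
    congr 1
    apply List.filter_congr
    intro kv hkv
    simp only [Function.comp, lookup_isSome_mem, pvGet_of_nodup_mem d1 kv h1 hkv,
      contains_eq_decide, Bool.and_comm]

lemma set_add_of_not_mem {s : PySem.Set String} {k : String} (h : k ∉ s) :
    PySem.Set.add s k = s ++ [k] := by
  simp [PySem.Set.add, PySem.Set.contains, h]

lemma dict_insert_of_not_mem {m : PySem.Dict String (Int × Int)} {k : String} {v : Int × Int}
    (h : k ∉ m.items.map Prod.fst) : m.insert k v = ⟨m.items ++ [(k, v)]⟩ := by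
  have hc : m.contains k = false := by
    simp only [PySem.Dict.contains, List.any_eq_false]
    intro p hp
    intro he
    exact h ((eq_of_beq he) ▸ List.mem_map_of_mem hp)
  simp [PySem.Dict.insert, hc]

lemma loop1 (d2 l : List (String × Int)) (a s : PySem.Set String)
    (m : PySem.Dict String (Int × Int))
    (hl : (l.map Prod.fst).Nodup)
    (ha : ∀ kv ∈ l, kv.1 ∉ a) (hm : ∀ kv ∈ l, kv.1 ∉ m.items.map Prod.fst)
    (hs : ∀ kv ∈ l, kv.1 ∉ s) :
    l.foldl (pvStep d2) (a, m, s)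
      = (a ++ addedC l d2, ⟨m.items ++ modC l d2⟩, s ++ sameC l d2) := by
  induction l generalizing a m s with
  | nil => simp [addedC, modC, sameC]
  | cons kv t ih =>
    simp only [List.map_cons, List.nodup_cons] at hl
    have hkey : ∀ kv' ∈ t, kv'.1 ≠ kv.1 := fun kv' h' he => hl.1 (he ▸ List.mem_map_of_mem h')
    have hmem : kv ∈ kv :: t := List.mem_cons_self
    rw [List.foldl_cons]
    cases hpv : pvLookup d2 kv.1 with
    | none =>
      have hstep : pvStep d2 (a, m, s) kv = (a ++ [kv.1], m, s) := by
        simp [pvStep, hpv, set_add_of_not_mem (ha kv hmem)]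
      rw [hstep, ih _ _ _ hl.2
        (fun kv' h' => by simp [List.mem_append]; exact ⟨ha kv' (List.mem_cons_of_mem _ h'), hkey kv' h'⟩)
        (fun kv' h' => hm kv' (List.mem_cons_of_mem _ h'))
        (fun kv' h' => hs kv' (List.mem_cons_of_mem _ h'))]
      simp [addedC, modC, sameC, hpv]
    | some w =>
      have hg : pvGet d2 kv.1 = w := by simp [pvGet, hpv]
      by_cases hv : kv.2 = w
      · have hstep : pvStep d2 (a, m, s) kv = (a, m, s ++ [kv.1]) := by
          simp [pvStep, hpv, hg, hv, set_add_of_not_mem (hs kv hmem)]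
        rw [hstep, ih _ _ _ hl.2
          (fun kv' h' => ha kv' (List.mem_cons_of_mem _ h'))
          (fun kv' h' => hm kv' (List.mem_cons_of_mem _ h'))
          (fun kv' h' => by simp [List.mem_append]; exact ⟨hs kv' (List.mem_cons_of_mem _ h'), hkey kv' h'⟩)]
        simp [addedC, modC, sameC, hpv, hg, hv]
      · have hstep : pvStep d2 (a, m, s) kv = (a, ⟨m.items ++ [(kv.1, (kv.2, w))]⟩, s) := by
          simp [pvStep, hpv, hg, hv, dict_insert_of_not_mem (hm kv hmem)]
        rw [hstep, ih _ _ _ hl.2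
          (fun kv' h' => ha kv' (List.mem_cons_of_mem _ h'))
          (fun kv' h' => by
            simp only [List.map_append, List.mem_append, List.map_cons, List.map_nil,
              List.mem_singleton, not_or]
            exact ⟨hm kv' (List.mem_cons_of_mem _ h'), by simpa using hkey kv' h'⟩)
          (fun kv' h' => hs kv' (List.mem_cons_of_mem _ h'))]
        simp [addedC, modC, sameC, hpv, hg, hv]

lemma loop2 (d1 l : List (String × Int)) (r : PySem.Set String)
    (hl : (l.map Prod.fst).Nodup) (hr : ∀ kv ∈ l, kv.1 ∉ r) :
    l.foldl (fun r kv => if (pvLookup d1 kv.1).isNone then PySem.Set.add r kv.1 else r) r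
      = r ++ addedC l d1 := by
  induction l generalizing r with
  | nil => simp [addedC]
  | cons kv t ih =>
    simp only [List.map_cons, List.nodup_cons] at hl
    have hkey : ∀ kv' ∈ t, kv'.1 ≠ kv.1 := fun kv' h' he => hl.1 (he ▸ List.mem_map_of_mem h')
    rw [List.foldl_cons]
    by_cases hn : (pvLookup d1 kv.1).isNone
    · rw [if_pos hn, set_add_of_not_mem (hr kv List.mem_cons_self), ih _ hl.2
        (fun kv' h' => by simp [List.mem_append]; exact ⟨hr kv' (List.mem_cons_of_mem _ h'), hkey kv' h'⟩)]
      simp [addedC, hn]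
    · rw [if_neg hn, ih _ hl.2 (fun kv' h' => hr kv' (List.mem_cons_of_mem _ h'))]
      simp [addedC, hn]

lemma dict_compare_alt_eq_canon (d1 d2 : List (String × Int))
    (h1 : (d1.map Prod.fst).Nodup) (h2 : (d2.map Prod.fst).Nodup) :
    dict_compare_alt d1 d2 = (addedC d1 d2, addedC d2 d1, modC d1 d2, sameC d1 d2) := by
  have e1 := loop1 d2 d1 PySem.Set.empty PySem.Set.empty ⟨[]⟩ h1
    (by simp [PySem.Set.empty]) (by simp) (by simp [PySem.Set.empty])
  have e2 := loop2 d1 d2 PySem.Set.empty h2 (by simp [PySem.Set.empty])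
  simp only [dict_compare_alt]
  rw [e1, e2]
  simp [PySem.Set.empty]

-- ===== VERDICT (by name: the statement is the Claim_ definition above) =====
theorem dict_compare_spec : Claim_equal_dict_compare := by
  intro d1 d2 _ hpre
  unfold Spec_dict_compare
  rw [dict_compare_eq_canon d1 d2 hpre.1 hpre.2, dict_compare_alt_eq_canon d1 d2 hpre.1 hpre.2]
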